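-- pv_equiv track=rewrite | github.com/krotalias/cwdc | downloads/python/labs/_08b_xis.py | xis
-- ===== SOURCE A (Python) =====
-- def xis(n):
--     s = ""
--     for i in range(n, 0, -1):
--         s += (n - i) * " " + "*" + (2 * i - 1) * " " + "*" + "\n"
--     s += " " * n + "*" + "\n"
--     for i in range(1, n + 1):
--         s += (n - i) * " " + "*" + (2 * i - 1) * " " + "*" + "\n"
--     return s
-- ===== SOURCE B (Python) =====
-- def xis(n):
--     if n <= 0:
--         return "*\n"
--     rows = []
--     for r in range(2 * n + 1):
--         lo, hi = min(r, 2 * n - r), max(r, 2 * n - r)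
--         buf = bytearray(b" " * (hi + 1))
--         buf[lo] = 0x2A
--         buf[hi] = 0x2A
--         rows.append(buf.decode())
--     return "\n".join(rows) + "\n"
-- ===== Notes on version B (the rewrite author's own statement) =====
-- stated objective: alternative
-- what changed: A concatenates space-runs in three separate phases (descending loop, middle line, ascending loop); B generates one uniform grid of 2n+1 rows, computing for each row the two star columns min/max(r, 2n-r), writing them into a space-filled row buffer, and joining the rows.
import Mathlib
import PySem

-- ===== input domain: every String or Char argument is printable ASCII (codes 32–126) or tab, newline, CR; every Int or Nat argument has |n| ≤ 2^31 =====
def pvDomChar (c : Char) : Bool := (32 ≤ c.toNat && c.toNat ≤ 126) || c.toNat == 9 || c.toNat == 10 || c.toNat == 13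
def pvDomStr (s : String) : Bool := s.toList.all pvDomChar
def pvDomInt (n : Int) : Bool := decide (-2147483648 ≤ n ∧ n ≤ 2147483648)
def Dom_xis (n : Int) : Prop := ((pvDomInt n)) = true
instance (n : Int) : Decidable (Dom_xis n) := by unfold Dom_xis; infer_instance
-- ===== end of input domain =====

-- B replaces A's three concatenation phases by one uniform loop over the 2n+1 grid rows,
-- each cell chosen by a position predicate against the two star columns (objective: alternative).

-- ===== PORT A =====
def xis (n : Int) : String :=
  let s : List Char :=
    (PySem.List.pyRange n 0 (-1)).foldl
      (fun s i =>
        s ++ (PySem.List.pyRepeat [' '] (n - i) ++ ['*'] ++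
              PySem.List.pyRepeat [' '] (2 * i - 1) ++ ['*'] ++ ['\n'])) []
  let s := s ++ (PySem.List.pyRepeat [' '] n ++ ['*'] ++ ['\n'])
  let s :=
    (PySem.List.pyRange 1 (n + 1)).foldl
      (fun s i =>
        s ++ (PySem.List.pyRepeat [' '] (n - i) ++ ['*'] ++
              PySem.List.pyRepeat [' '] (2 * i - 1) ++ ['*'] ++ ['\n'])) s
  String.ofList s

-- ===== PORT B =====
-- bytearray buffer of hi+1 spaces with cells lo and hi set to '*' (both indices are
-- nonnegative at every call site, so .toNat is exact for Python's indexing here)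
def xisRow (lo hi : Int) : List Char :=
  ((List.replicate (hi + 1).toNat ' ').set lo.toNat '*').set hi.toNat '*'

def xis_alt (n : Int) : String :=
  if n ≤ 0 then "*\n"
  else
    let rows := (PySem.List.pyRange 0 (2 * n + 1)).map
      (fun r => xisRow (min r (2 * n - r)) (max r (2 * n - r)))
    String.ofList (PySem.Chars.join ['\n'] rows ++ ['\n'])

-- ===== PRECONDITION & SPEC =====
def Spec_xis (n : Int) (out : String) : Prop := out = xis_alt n
instance (n : Int) (out : String) : Decidable (Spec_xis n out) := by unfold Spec_xis; infer_instance

-- ===== CLAIM (what is proved, stated in full; the proofs are below) =====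
def Claim_equal_xis : Prop := ∀ (n : Int), Dom_xis n → Spec_xis n (xis n)

-- ===== LEMMAS AND PROOFS =====

-- pyRange(n, 0, -1) enumerates n, n-1, …, 1
lemma pyRange_desc (k : Nat) :
    PySem.List.pyRange (k : Int) 0 (-1) = (List.range k).map (fun (r : Nat) => (k : Int) - (r : Int)) := by
  rw [PySem.List.pyRange_of_neg _ _ (by norm_num : (-1 : Int) < 0)]
  have hcount : (if (0 : Int) < (k : Int) then (((k : Int) - 0 + -(-1) - 1) / -(-1)).toNat else 0) = k := by
    split <;> simp_all
  rw [hcount]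
  exact List.map_congr_left (fun r _ => by ring)

-- pyRange(1, k+1) enumerates 1, …, k
lemma pyRange_asc (k : Nat) :
    PySem.List.pyRange 1 ((k : Int) + 1) = (List.range k).map (fun (j : Nat) => (j : Int) + 1) := by
  rw [PySem.List.pyRange_one]
  have hcount : (((k : Int) + 1 - 1).toNat) = k := by omega
  rw [hcount]
  exact List.map_congr_left (fun r _ => by ring)

-- '\n'.join(rows) + '\n' glues a '\n' after every row
lemma join_newline (rows : List (List Char)) (h : rows ≠ []) :
    PySem.Chars.join ['\n'] rows ++ ['\n'] = rows.flatMap (fun r => r ++ ['\n']) := by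
  induction rows with
  | nil => exact absurd rfl h
  | cons p rest ih =>
      cases rest with
      | nil => simp [PySem.Chars.join_singleton]
      | cons q t =>
          rw [PySem.Chars.join_cons_cons, List.flatMap_cons, ← ih (by simp)]
          simp

-- xisRow written in closed Nat form
lemma xisRow_eq (a b : Nat) (h : a < b) :
    xisRow (a : Int) (b : Int)
      = List.replicate a ' ' ++ '*' :: (List.replicate (b - a - 1) ' ' ++ ['*']) := by
  unfold xisRow
  rw [show (((b : Int) + 1)).toNat = b + 1 from by omega,
      show ((a : Int)).toNat = a from by omega, show ((b : Int)).toNat = b from by omega]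
  have hrep : List.replicate (b + 1) ' ' =
      List.replicate a ' ' ++ ' ' :: (List.replicate (b - a - 1) ' ' ++ [' ']) := by
    rw [show b + 1 = a + ((b - a - 1) + 1 + 1) from by omega, List.replicate_add]
    congr 1
    rw [show (b - a - 1) + 1 + 1 = ((b - a - 1) + 1) + 1 from rfl, List.replicate_succ]
    congr 1
    exact List.replicate_succ'
  rw [hrep, List.set_append, if_neg (by simp), List.length_replicate, Nat.sub_self,
      List.set_cons_zero, List.set_append, if_neg (by simp; omega), List.length_replicate,
      show b - a = (b - a - 1) + 1 from by omega, List.set_cons_succ, List.set_append,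
      if_neg (by simp)]
  simp

lemma xisRow_mid (a : Nat) :
    xisRow (a : Int) (a : Int) = List.replicate a ' ' ++ ['*'] := by
  unfold xisRow
  rw [show (((a : Int) + 1)).toNat = a + 1 from by omega,
      show ((a : Int)).toNat = a from by omega, List.set_set, List.replicate_succ',
      List.set_append, if_neg (by simp), List.length_replicate, Nat.sub_self,
      List.set_cons_zero]

-- the main positive case, stated on Nat
lemma xis_eq_alt_pos (k : Nat) (hk : 1 ≤ k) : xis (k : Int) = xis_alt (k : Int) := by
  have hknot : ¬ ((k : Int) ≤ 0) := by omega
  unfold xis xis_alt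
  rw [if_neg hknot]
  simp only []
  apply congrArg String.ofList
  -- A side: the two folds become flatMaps
  rw [PySem.List.foldl_append_eq_flatMap, PySem.List.foldl_append_eq_flatMap, List.nil_append]
  -- B side: range normal form, then join → flatMap
  rw [show (2 * (k : Int) + 1) = ((2 * k + 1 : Nat) : Int) by push_cast; ring,
      PySem.List.pyRange_zero_natCast, List.map_map,
      join_newline _ (by simp [List.range_eq_nil]),
      List.flatMap_map]
  -- split the grid rows into [0..k-1], [k], [k+1..2k]
  rw [show 2 * k + 1 = (k + 1) + k from by omega, List.range_add, List.range_succ,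
      List.flatMap_append, List.flatMap_append, List.flatMap_map,
      pyRange_desc k, pyRange_asc k, List.flatMap_map, List.flatMap_map]
  simp only [List.flatMap_cons, List.flatMap_nil, List.append_nil]
  congr 1
  · congr 1
    -- descending loop = rows 0..k-1
    · apply List.flatMap_congr
      intro r hr
      rw [List.mem_range] at hr
      simp only [Function.comp_apply]
      have e1 : (k : Int) - ((k : Int) - r) = (r : Int) := by ring
      have emin : min ((r : Nat) : Int) (2 * (k : Int) - r) = ((r : Nat) : Int) := min_eq_left (by omega)
      have emax : max ((r : Nat) : Int) (2 * (k : Int) - r) = ((2 * k - r : Nat) : Int) := by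
        rw [max_eq_right (by omega)]; omega
      rw [e1, emin, emax, xisRow_eq r (2 * k - r) (by omega),
          PySem.List.pyRepeat_singleton, PySem.List.pyRepeat_singleton]
      have t1 : ((r : Int)).toNat = r := by omega
      have t2 : (2 * ((k : Int) - r) - 1).toNat = 2 * k - r - r - 1 := by omega
      rw [t1, t2]
      simp
    -- middle row
    · simp only [Function.comp_apply]
      have emin : min ((k : Nat) : Int) (2 * (k : Int) - k) = ((k : Nat) : Int) := by
        rw [min_eq_left (by omega)]
      have emax : max ((k : Nat) : Int) (2 * (k : Int) - k) = ((k : Nat) : Int) := by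
        rw [max_eq_left (by omega)]
      rw [emin, emax, xisRow_mid k, PySem.List.pyRepeat_singleton]
      have t1 : ((k : Int)).toNat = k := by omega
      rw [t1]
  -- ascending loop = rows k+1..2k
  · apply List.flatMap_congr
    intro j hj
    rw [List.mem_range] at hj
    simp only [Function.comp_apply]
    have emin : min (((k + 1 + j : Nat)) : Int) (2 * (k : Int) - ((k + 1 + j : Nat) : Int))
        = ((k - 1 - j : Nat) : Int) := by
      rw [min_eq_right (by push_cast; omega)]; push_cast; omega
    have emax : max (((k + 1 + j : Nat)) : Int) (2 * (k : Int) - ((k + 1 + j : Nat) : Int))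
        = ((k + 1 + j : Nat) : Int) := max_eq_left (by push_cast; omega)
    rw [emin, emax, xisRow_eq (k - 1 - j) (k + 1 + j) (by omega),
        PySem.List.pyRepeat_singleton, PySem.List.pyRepeat_singleton]
    have t1 : ((k : Int) - ((j : Int) + 1)).toNat = k - 1 - j := by omega
    have t2 : (2 * ((j : Int) + 1) - 1).toNat = k + 1 + j - (k - 1 - j) - 1 := by omega
    rw [t1, t2]
    simp

-- ===== VERDICT (by name: the statement is the Claim_ definition above) =====
theorem xis_spec : Claim_equal_xis := by
  intro n _
  unfold Spec_xis
  by_cases hn : n ≤ 0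
  · have hA : xis n = "*\n" := by
      unfold xis
      have h1 : PySem.List.pyRange n 0 (-1) = [] := by
        rw [PySem.List.pyRange_of_neg _ _ (by norm_num : (-1 : Int) < 0),
            if_neg (by omega : ¬ (0 : Int) < n)]
        rfl
      have h2 : PySem.List.pyRange 1 (n + 1) = [] := by
        rw [PySem.List.pyRange_one]
        have : (n + 1 - 1).toNat = 0 := by omega
        rw [this]
        rfl
      have h3 : PySem.List.pyRepeat [' '] n = [] := by
        rw [PySem.List.pyRepeat_singleton, Int.toNat_of_nonpos hn, List.replicate_zero]
      rw [h1, h2, h3]; rfl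
    rw [hA]; unfold xis_alt; rw [if_pos hn]
  · obtain ⟨k, rfl⟩ : ∃ k : Nat, n = (k : Int) := ⟨n.toNat, by omega⟩
    exact xis_eq_alt_pos k (by omega)
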